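-- pv_equiv track=rewrite | github.com/elisaF/typing-classification | feature_extraction_common.py | create_typed_word
-- ===== SOURCE A (Python) =====
-- def create_typed_word(row):
--     typed_word = ""
--     word = row['Raw Typed']
--     space = '}'
--     backspace = '*'
--
--     # word was not corrected
--     if backspace not in word:
--         if space not in word:
--             typed_word = word
--         else:
--             typed_word = word[:word.index(space)]
--     # word was corrected
--     else:
--         backspace_counter, num_backspace = 0, 0
--         for char in word:
--             if char == space:
--                 break
--             elif char == backspace:
--                 # reset counter if needed
--                 # i.e., we deleted the backspaced characters, and now encountered another backspace
--                 # so we need to reset the counters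
--                 if num_backspace == backspace_counter:
--                     backspace_counter, num_backspace = 0, 0
--                 num_backspace += 1
--             else:
--                 if num_backspace == backspace_counter:
--                     typed_word += char
--                     # reset counters
--                     backspace_counter, num_backspace = 0, 0
--                 else:
--                     backspace_counter += 1
--     return typed_word
-- ===== SOURCE B (Python) =====
-- def create_typed_word(row):
--     # Eager-deletion algorithm: no counters at all. Each '*' immediately erases
--     # its victim -- the first following non-'*' character (stopping at '}') --
--     # from the remaining input; kept characters are emitted as they are popped.
--     s = list(row['Raw Typed'])
--     out = []
--     while s:
--         c = s.pop(0)
--         if c == '}':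
--             break
--         if c == '*':
--             j = 0
--             while j < len(s) and s[j] == '*':
--                 j += 1
--             if j < len(s) and s[j] != '}':
--                 del s[j]
--         else:
--             out.append(c)
--     return ''.join(out)
-- ===== Notes on version B (the rewrite author's own statement) =====
-- stated objective: alternative
-- what changed: Replaced A's no-backspace fast path plus its two-counter deferred-skip loop by a counter-free eager-deletion algorithm: each '*' immediately erases its victim (the first following non-'*' char, stopping at '}') from the remaining input, and kept characters are emitted as they are popped.
import Mathlib
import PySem

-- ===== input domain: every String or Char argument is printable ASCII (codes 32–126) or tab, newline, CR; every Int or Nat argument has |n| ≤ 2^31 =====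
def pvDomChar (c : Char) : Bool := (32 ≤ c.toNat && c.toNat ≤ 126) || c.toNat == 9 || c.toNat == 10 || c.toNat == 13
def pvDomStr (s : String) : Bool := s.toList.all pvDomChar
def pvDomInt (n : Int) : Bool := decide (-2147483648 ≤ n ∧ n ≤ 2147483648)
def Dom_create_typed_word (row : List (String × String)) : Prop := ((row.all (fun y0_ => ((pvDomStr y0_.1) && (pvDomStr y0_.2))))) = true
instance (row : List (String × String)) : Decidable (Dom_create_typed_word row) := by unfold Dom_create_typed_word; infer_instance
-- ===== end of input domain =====

-- B (alternative): counter-free eager-deletion algorithm — each '*' immediately erases its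
-- victim from the remaining input instead of A's two-counter deferred-skip bookkeeping.

-- ===== PORT A =====
-- the 'for char in word' loop of A's corrected branch; state (typed_word, backspace_counter, num_backspace)
def ctwLoopA : List Char → List Char → Nat → Nat → List Char
  | [], typed, _, _ => typed
  | c :: cs, typed, bc, nb =>
    if c = '}' then typed
    else if c = '*' then
      -- reset both counters if needed, then num_backspace += 1
      if nb = bc then ctwLoopA cs typed 0 1
      else ctwLoopA cs typed bc (nb + 1)
    else
      if nb = bc then ctwLoopA cs (typed ++ [c]) 0 0
      else ctwLoopA cs typed (bc + 1) nb

def create_typed_word (row : List (String × String)) : String :=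
  match row.lookup "Raw Typed" with
  | none => ""   -- Python raises KeyError here; excluded by Pre_
  | some word =>
    if PySem.Str.isIn "*" word = false then
      if PySem.Str.isIn "}" word = false then word
      else PySem.Str.slice word none (some (PySem.Str.find word "}"))  -- word[:word.index('}')]
    else
      String.ofList (ctwLoopA word.toList [] 0 0)

-- ===== PORT B =====
-- Source B's inner scan: skip leading '*'s, then delete the first char unless it is '}' (or absent)
def ctwDel1 : List Char → List Char
  | [] => []
  | c :: t => if c = '}' then c :: t else if c = '*' then c :: ctwDel1 t else t

theorem ctwDel1_length_le : ∀ (l : List Char), (ctwDel1 l).length ≤ l.length := by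
  intro l
  induction l with
  | nil => simp [ctwDel1]
  | cons c t ih =>
    simp only [ctwDel1]
    split_ifs <;> simp
    omega

-- Source B's outer while loop: pop a char; '}' stops, '*' eagerly deletes its victim, else emit
def ctwLoopC : List Char → List Char
  | [] => []
  | c :: t =>
    if c = '}' then []
    else if c = '*' then ctwLoopC (ctwDel1 t)
    else c :: ctwLoopC t
termination_by l => l.length
decreasing_by
  · exact Nat.lt_succ_of_le (ctwDel1_length_le t)
  · simp

def create_typed_word_alt (row : List (String × String)) : String :=
  match row.lookup "Raw Typed" with
  | none => ""   -- Python raises KeyError here; excluded by Pre_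
  | some word => String.ofList (ctwLoopC word.toList)

-- ===== PRECONDITION & SPEC =====
-- Pre_ excludes only rows without the key 'Raw Typed', on which Python A raises KeyError.
def Pre_create_typed_word (row : List (String × String)) : Prop :=
  "Raw Typed" ∈ row.map Prod.fst

instance (row : List (String × String)) : Decidable (Pre_create_typed_word row) := by
  unfold Pre_create_typed_word; infer_instance

def pvWitness_create_typed_word : (List (String × String)) := [("Raw Typed", "ab*c}xx")]

def Spec_create_typed_word (row : List (String × String)) (out : String) : Prop := out = create_typed_word_alt row
instance (row : List (String × String)) (out : String) : Decidable (Spec_create_typed_word row out) := by unfold Spec_create_typed_word; infer_instance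

-- ===== CLAIM (what is proved, stated in full; the proofs are below) =====
def Claim_equal_create_typed_word : Prop := ∀ (row : List (String × String)), Dom_create_typed_word row → Pre_create_typed_word row → Spec_create_typed_word row (create_typed_word row)

-- ===== LEMMAS AND PROOFS =====

-- proof-side helper: the 'pending deletions' view of the process (debt = nb - bc in A)
def ctwDebt : List Char → List Char → Nat → List Char
  | [], acc, _ => acc
  | c :: cs, acc, debt =>
    if c = '}' then acc
    else if c = '*' then ctwDebt cs acc (debt + 1)
    else if debt = 0 then ctwDebt cs (acc ++ [c]) 0
    else ctwDebt cs acc (debt - 1)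

-- A's pair of counters always satisfies bc ≤ nb; their difference nb - bc is the debt.
theorem ctwLoopA_eq_debt : ∀ (cs typed : List Char) (bc nb : Nat), bc ≤ nb →
    ctwLoopA cs typed bc nb = ctwDebt cs typed (nb - bc) := by
  intro cs
  induction cs with
  | nil => intro typed bc nb _; rfl
  | cons c cs ih =>
    intro typed bc nb h
    simp only [ctwLoopA, ctwDebt]
    by_cases hbr : c = '}'
    · simp [hbr]
    rw [if_neg hbr, if_neg hbr]
    by_cases hst : c = '*'
    · rw [if_pos hst, if_pos hst]
      by_cases he : nb = bc
      · rw [if_pos he, ih typed 0 1 (by omega)]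
        congr 1; omega
      · rw [if_neg he, ih typed bc (nb + 1) (by omega)]
        congr 1; omega
    · rw [if_neg hst, if_neg hst]
      by_cases he : nb = bc
      · rw [if_pos he, if_pos (by omega : nb - bc = 0), ih (typed ++ [c]) 0 0 (by omega)]
      · rw [if_neg he, if_neg (by omega : ¬ nb - bc = 0), ih typed (bc + 1) nb (by omega),
          show nb - (bc + 1) = nb - bc - 1 by omega]

-- ctwDel1 passes through leading stars
theorem ctwDel1_stars : ∀ (k : Nat) (l : List Char),
    ctwDel1 (List.replicate k '*' ++ l) = List.replicate k '*' ++ ctwDel1 l := by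
  intro k
  induction k with
  | zero => intro l; simp
  | succ k ih =>
    intro l
    simp only [List.replicate_succ, List.cons_append, ctwDel1]
    rw [if_neg (by decide)]
    simp [ih]

-- a fixed point of ctwDel1 absorbs any number of leading stars in ctwLoopC
theorem ctwLoopC_stars_fix : ∀ (d : Nat) (l : List Char), ctwDel1 l = l →
    ctwLoopC (List.replicate d '*' ++ l) = ctwLoopC l := by
  intro d
  induction d with
  | zero => intro l _; simp
  | succ d ih =>
    intro l hl
    rw [List.replicate_succ, List.cons_append, ctwLoopC,
      if_neg (by decide), if_pos rfl, ctwDel1_stars, hl, ih l hl]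

-- the debt process is the eager-deletion process run on the input with the debt
-- materialised as that many leading stars
theorem ctwDebt_eq_loopC : ∀ (cs acc : List Char) (d : Nat),
    ctwDebt cs acc d = acc ++ ctwLoopC (List.replicate d '*' ++ cs) := by
  intro cs
  induction cs with
  | nil =>
    intro acc d
    rw [ctwDebt, List.append_nil, show List.replicate d '*' = List.replicate d '*' ++ [] by simp,
      ctwLoopC_stars_fix d [] rfl]
    simp [ctwLoopC]
  | cons c cs ih =>
    intro acc d
    simp only [ctwDebt]
    by_cases hbr : c = '}'
    · rw [if_pos hbr, ctwLoopC_stars_fix d (c :: cs) (by simp [ctwDel1, hbr]), hbr,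
        ctwLoopC, if_pos rfl, List.append_nil]
    rw [if_neg hbr]
    by_cases hst : c = '*'
    · rw [if_pos hst, ih acc (d + 1), hst,
        show List.replicate d '*' ++ '*' :: cs = List.replicate (d + 1) '*' ++ cs by
          rw [List.replicate_succ']; simp]
    rw [if_neg hst]
    by_cases hd : d = 0
    · subst hd
      rw [if_pos rfl, ih (acc ++ [c]) 0]
      simp only [List.replicate, List.nil_append, List.append_assoc, List.singleton_append]
      rw [ctwLoopC, if_neg hbr, if_neg hst]
    · rw [if_neg hd]
      obtain ⟨e, rfl⟩ : ∃ e, d = e + 1 := ⟨d - 1, by omega⟩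
      rw [ih acc (e + 1 - 1), List.replicate_succ, List.cons_append, ctwLoopC,
        if_neg (by decide), if_pos rfl, ctwDel1_stars,
        show ctwDel1 (c :: cs) = cs by simp [ctwDel1, hbr, hst]]
      simp

-- with no '*', the eager-deletion loop copies characters up to the first '}'
theorem ctwLoopC_no_star : ∀ (cs : List Char), '*' ∉ cs →
    ctwLoopC cs = cs.takeWhile (fun c => c ≠ '}') := by
  intro cs
  induction cs with
  | nil => simp [ctwLoopC]
  | cons c cs ih =>
    intro hns
    have hcs : '*' ∉ cs := fun h => hns (List.mem_cons_of_mem _ h)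
    have hc : c ≠ '*' := fun h => hns (h ▸ List.mem_cons_self ..)
    by_cases hbr : c = '}'
    · simp [ctwLoopC, hbr, List.takeWhile]
    · rw [ctwLoopC, if_neg hbr, if_neg hc, ih hcs]
      simp [List.takeWhile, hbr]

theorem lookup_isSome_of_mem {β : Type} : ∀ (l : List (String × β)) (a : String),
    a ∈ l.map Prod.fst → (l.lookup a).isSome := by
  intro l a h
  induction l with
  | nil => simp at h
  | cons p t ih =>
    simp only [List.lookup]
    by_cases hp : a == p.1
    · simp [hp]
    · simp only [List.map, List.mem_cons] at h
      rcases h with h | h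
      · exact absurd (by simp [h]) hp
      · simpa [hp] using ih h

theorem not_mem_of_not_infix_singleton {α : Type} {l : List α} {c : α}
    (h : ¬ ([c] <:+: l)) : c ∉ l := by
  intro hm
  obtain ⟨s, t, rfl⟩ := List.append_of_mem hm
  exact h ⟨s, t, by simp⟩

-- take up to the first '}' is takeWhile (≠ '}')
theorem take_eq_takeWhile : ∀ (l : List Char) (k : Nat), k ≤ l.length →
    (∀ i (hi : i < l.length), i < k → l[i] ≠ '}') →
    (∀ hk : k < l.length, l[k] = '}') →
    l.take k = l.takeWhile (fun c => c ≠ '}') := by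
  intro l
  induction l with
  | nil => intro k _ _ _; simp
  | cons c cs ih =>
    intro k hk h1 h2
    match k with
    | 0 =>
      have hc : c = '}' := h2 (by simp)
      rw [List.takeWhile_cons_of_neg (by simp [hc])]
      simp
    | j + 1 =>
      have hc : c ≠ '}' := h1 0 (by simp) (by omega)
      rw [List.takeWhile_cons_of_pos (by simpa using hc)]
      simp only [List.take]
      congr 1
      exact ih j (by simpa using hk)
        (fun i hi hij => by simpa using h1 (i + 1) (by simpa using hi) (by omega))
        (fun hj => by simpa using h2 (by simpa using hj))

theorem create_typed_word_spec_aux (word : String) :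
    (if PySem.Str.isIn "*" word = false then
      if PySem.Str.isIn "}" word = false then word
      else PySem.Str.slice word none (some (PySem.Str.find word "}"))
    else String.ofList (ctwLoopA word.toList [] 0 0))
    = String.ofList (ctwLoopC word.toList) := by
  by_cases hst : PySem.Str.isIn "*" word = false
  · -- no '*' in word: the eager loop never deletes, it is takeWhile (≠ '}')
    have hns : '*' ∉ word.toList :=
      not_mem_of_not_infix_singleton
        ((PySem.Chars.isIn_eq_false_iff ['*'] word.toList).mp (by simpa using hst))
    rw [if_pos hst, ctwLoopC_no_star word.toList hns]
    by_cases hsp : PySem.Str.isIn "}" word = false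
    · -- no '}' either: takeWhile keeps everything
      have hnp : '}' ∉ word.toList :=
        not_mem_of_not_infix_singleton
          ((PySem.Chars.isIn_eq_false_iff ['}'] word.toList).mp (by simpa using hsp))
      rw [if_pos hsp, List.takeWhile_eq_self_iff.mpr]
      · simp
      · intro a ha
        simp only [decide_eq_true_eq]
        exact fun h => hnp (h ▸ ha)
    · -- '}' present: word[:find] is the prefix before the first '}'
      rw [if_neg hsp]
      have hinf : "}".toList <:+: word.toList := by
        rw [← PySem.Str.isIn_iff_infix "}" word]
        cases h : PySem.Str.isIn "}" word
        · exact absurd h hsp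
        · rfl
      have h0 : (0 : Int) ≤ PySem.Str.find word "}" := (PySem.Str.find_nonneg_iff word "}").mpr hinf
      have h0' : (0 : Int) ≤ PySem.Chars.find word.toList ['}'] := by
        simpa using h0
      obtain ⟨hpre1, hmin⟩ := PySem.Chars.find_spec h0'
      obtain ⟨t, ht⟩ := hpre1
      have hk_lt : (PySem.Chars.find word.toList ['}']).toNat < word.toList.length := by
        have hlen := congrArg List.length ht
        simp only [List.length_append, List.length_cons, List.length_nil, List.length_drop] at hlen
        omega
      have hgk : word.toList[(PySem.Chars.find word.toList ['}']).toNat] = '}' := by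
        have h2 := ht.symm
        rw [List.drop_eq_getElem_cons hk_lt] at h2
        simp only [List.singleton_append] at h2
        exact (List.cons_eq_cons.mp h2).1
      have htw : word.toList.take (PySem.Chars.find word.toList ['}']).toNat
          = word.toList.takeWhile (fun c => c ≠ '}') := by
        apply take_eq_takeWhile _ _ (by omega)
        · intro i hi hik hieq
          apply hmin i (by exact_mod_cast hik)
          refine ⟨word.toList.drop (i + 1), ?_⟩
          rw [List.drop_eq_getElem_cons hi, hieq]
          simp
        · intro _; exact hgk
      have hsl : (PySem.Str.slice word none (some (PySem.Str.find word "}"))).toList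
          = word.toList.take (PySem.Chars.find word.toList ['}']).toNat := by
        simp [PySem.List.slice_to _ h0']
      conv_lhs => rw [← String.ofList_toList
        (s := PySem.Str.slice word none (some (PySem.Str.find word "}")))]
      rw [hsl, htw]
  · rw [if_neg hst, ctwLoopA_eq_debt word.toList [] 0 0 (le_refl 0),
      ctwDebt_eq_loopC word.toList [] 0]
    simp

-- ===== VERDICT (by name: the statement is the Claim_ definition above) =====
theorem create_typed_word_spec : Claim_equal_create_typed_word := by
  intro row _ hpre
  show create_typed_word row = create_typed_word_alt row
  unfold create_typed_word create_typed_word_alt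
  cases hl : row.lookup "Raw Typed" with
  | none =>
    exact absurd (lookup_isSome_of_mem row "Raw Typed" hpre) (by simp [hl])
  | some word => exact create_typed_word_spec_aux word
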